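-- pv_equiv track=rewrite | github.com/alva2000/IA-gmcomponents | test_ia.py | seleccionar_por_id
-- ===== SOURCE A (Python) =====
-- def seleccionar_por_id(productos, cpu_id, gpu_id, ram_id, mb_id, case_id):
--     cpu = gpu = ram = mb = case = None
--
--     for p in productos:
--         try:
--             pid = int(p["id"])
--             categoria = p["categoria"].lower()
--
--             if cpu_id and pid == cpu_id and "procesador" in categoria:
--                 cpu = p
--
--             elif gpu_id and pid == gpu_id and "grafica" in categoria:
--                 gpu = p
--
--             elif ram_id and pid == ram_id and "ram" in categoria:
--                 ram = p
--
--             elif mb_id and pid == mb_id and "placa" in categoria: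
--                 mb = p
--
--             elif case_id and pid == case_id and "gabinete" in categoria:
--                 case = p
--
--         except:
--             continue
--
--     return cpu, gpu, ram, mb, case
-- ===== SOURCE B (Python) =====
-- def seleccionar_por_id(productos, cpu_id, gpu_id, ram_id, mb_id, case_id):
--     specs = ((cpu_id, "procesador"), (gpu_id, "grafica"), (ram_id, "ram"),
--              (mb_id, "placa"), (case_id, "gabinete"))
--
--     def classify(p):
--         # first spec slot this product would match, or None (parse errors -> None)
--         try:
--             pid = int(p["id"])
--             cat = p["categoria"].lower()
--         except Exception:
--             return None
--         for i, (tid, kw) in enumerate(specs):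
--             if tid and pid == tid and kw in cat:
--                 return i
--         return None
--
--     tagged = [(classify(p), p) for p in productos]
--     # per slot, the last product classified to it ("last write wins")
--     return tuple(next((p for i, p in reversed(tagged) if i == slot), None)
--                  for slot in range(5))
-- ===== Notes on version B (the rewrite author's own statement) =====
-- stated objective: alternative
-- what changed: B replaces A's single accumulating pass with mutable slot variables by a staged map-then-select pipeline: first classify every product to the slot it would fill (or None), then fill each of the five slots independently by searching the classified list back-to-front for the last product assigned to it.
import Mathlib
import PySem

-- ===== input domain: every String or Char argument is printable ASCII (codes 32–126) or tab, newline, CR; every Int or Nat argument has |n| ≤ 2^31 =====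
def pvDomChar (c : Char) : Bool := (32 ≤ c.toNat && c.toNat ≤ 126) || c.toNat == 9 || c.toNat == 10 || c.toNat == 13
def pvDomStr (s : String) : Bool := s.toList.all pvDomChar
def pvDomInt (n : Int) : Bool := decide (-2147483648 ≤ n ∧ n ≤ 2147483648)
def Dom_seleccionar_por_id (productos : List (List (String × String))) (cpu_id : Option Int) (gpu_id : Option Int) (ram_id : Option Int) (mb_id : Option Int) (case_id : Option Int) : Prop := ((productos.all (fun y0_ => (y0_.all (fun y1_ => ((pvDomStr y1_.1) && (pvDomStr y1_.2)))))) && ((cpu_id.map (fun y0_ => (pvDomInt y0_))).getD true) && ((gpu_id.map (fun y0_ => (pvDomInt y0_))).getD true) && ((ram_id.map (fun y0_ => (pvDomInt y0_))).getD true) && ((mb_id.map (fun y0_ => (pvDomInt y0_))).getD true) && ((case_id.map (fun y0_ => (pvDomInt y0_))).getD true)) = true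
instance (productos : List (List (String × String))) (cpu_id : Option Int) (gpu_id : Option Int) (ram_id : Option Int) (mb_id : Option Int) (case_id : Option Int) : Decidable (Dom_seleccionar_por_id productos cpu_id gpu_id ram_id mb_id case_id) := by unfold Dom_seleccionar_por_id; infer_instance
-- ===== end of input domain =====

-- B replaces A's single accumulating pass (five mutable slot variables, elif chain) by a
-- staged pipeline: classify every product to its slot, then fill each slot with the last
-- product classified to it, searching the classified list back-to-front (objective: alternative).

-- `tid and pid == tid and kw in categoria` (the literal condition both Pythons test)
def pvCond (tid : Option Int) (pid : Int) (kw cat : String) : Bool :=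
  match tid with
  | none => false
  | some v => v != 0 && pid == v && PySem.Str.isIn kw cat

-- ===== PORT A =====
-- A's per-product try-body: dict lookups / int() may raise (none) → continue (state unchanged)
def pvStepA (cpu_id gpu_id ram_id mb_id case_id : Option Int)
    (s : Option (List (String × String)) × Option (List (String × String)) × Option (List (String × String)) × Option (List (String × String)) × Option (List (String × String)))
    (p : List (String × String)) :
    Option (List (String × String)) × Option (List (String × String)) × Option (List (String × String)) × Option (List (String × String)) × Option (List (String × String)) :=
  match (PySem.Dict.mk p).get? "id" with
  | none => s
  | some ids =>
    match PySem.Int.ofStr? ids with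
    | none => s
    | some pid =>
      match (PySem.Dict.mk p).get? "categoria" with
      | none => s
      | some c =>
        let cat := PySem.Str.lower c
        let (cpu, gpu, ram, mb, cas) := s
        if pvCond cpu_id pid "procesador" cat then (some p, gpu, ram, mb, cas)
        else if pvCond gpu_id pid "grafica" cat then (cpu, some p, ram, mb, cas)
        else if pvCond ram_id pid "ram" cat then (cpu, gpu, some p, mb, cas)
        else if pvCond mb_id pid "placa" cat then (cpu, gpu, ram, some p, cas)
        else if pvCond case_id pid "gabinete" cat then (cpu, gpu, ram, mb, some p)
        else s

def seleccionar_por_id (productos : List (List (String × String))) (cpu_id : Option Int) (gpu_id : Option Int) (ram_id : Option Int) (mb_id : Option Int) (case_id : Option Int) : List (Option (List (String × String))) :=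
  let (cpu, gpu, ram, mb, cas) :=
    productos.foldl (pvStepA cpu_id gpu_id ram_id mb_id case_id) (none, none, none, none, none)
  [cpu, gpu, ram, mb, cas]

-- ===== PORT B =====
-- classify's inner `for i,(tid,kw) in enumerate(specs): if …: return i` / `return None`
def pvFirstIdx (specs : List (Option Int × String)) (i : Nat) (pid : Int) (cat : String) : Option Nat :=
  match specs with
  | [] => none
  | (tid, kw) :: rest =>
    if pvCond tid pid kw cat then some i else pvFirstIdx rest (i + 1) pid cat

-- Source B's classify(p): parse errors → none, else first matching spec index
def pvClassify (specs : List (Option Int × String)) (p : List (String × String)) : Option Nat :=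
  match (PySem.Dict.mk p).get? "id" with
  | none => none
  | some ids =>
    match PySem.Int.ofStr? ids with
    | none => none
    | some pid =>
      match (PySem.Dict.mk p).get? "categoria" with
      | none => none
      | some c => pvFirstIdx specs 0 pid (PySem.Str.lower c)

def seleccionar_por_id_alt (productos : List (List (String × String))) (cpu_id : Option Int) (gpu_id : Option Int) (ram_id : Option Int) (mb_id : Option Int) (case_id : Option Int) : List (Option (List (String × String))) :=
  let specs : List (Option Int × String) :=
    [(cpu_id, "procesador"), (gpu_id, "grafica"), (ram_id, "ram"), (mb_id, "placa"), (case_id, "gabinete")]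
  let tagged := productos.map (fun p => (pvClassify specs p, p))
  (List.range 5).map (fun slot =>
    (tagged.reverse.find? (fun t => t.1 == some slot)).map Prod.snd)

-- ===== PRECONDITION & SPEC =====
def Spec_seleccionar_por_id (productos : List (List (String × String))) (cpu_id : Option Int) (gpu_id : Option Int) (ram_id : Option Int) (mb_id : Option Int) (case_id : Option Int) (out : List (Option (List (String × String)))) : Prop := out = seleccionar_por_id_alt productos cpu_id gpu_id ram_id mb_id case_id
instance (productos : List (List (String × String))) (cpu_id : Option Int) (gpu_id : Option Int) (ram_id : Option Int) (mb_id : Option Int) (case_id : Option Int) (out : List (Option (List (String × String)))) : Decidable (Spec_seleccionar_por_id productos cpu_id gpu_id ram_id mb_id case_id out) := by unfold Spec_seleccionar_por_id; infer_instance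

-- ===== CLAIM (what is proved, stated in full; the proofs are below) =====
def Claim_equal_seleccionar_por_id : Prop := ∀ (productos : List (List (String × String))) (cpu_id : Option Int) (gpu_id : Option Int) (ram_id : Option Int) (mb_id : Option Int) (case_id : Option Int), Dom_seleccionar_por_id productos cpu_id gpu_id ram_id mb_id case_id → Spec_seleccionar_por_id productos cpu_id gpu_id ram_id mb_id case_id (seleccionar_por_id productos cpu_id gpu_id ram_id mb_id case_id)

-- ===== LEMMAS AND PROOFS =====

-- flatten A's 5-tuple state to a 5-list
def pvToList (s : Option (List (String × String)) × Option (List (String × String)) × Option (List (String × String)) × Option (List (String × String)) × Option (List (String × String))) : List (Option (List (String × String))) :=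
  [s.1, s.2.1, s.2.2.1, s.2.2.2.1, s.2.2.2.2]

-- write p into the classified slot, if any
def pvSet5 (l : List (Option (List (String × String)))) (c : Option Nat) (p : List (String × String)) : List (Option (List (String × String))) :=
  match c with
  | none => l
  | some j => l.set j (some p)

theorem pvFirstIdx_lt (specs : List (Option Int × String)) (i : Nat) (pid : Int) (cat : String) (j : Nat)
    (h : pvFirstIdx specs i pid cat = some j) : j < i + specs.length := by
  induction specs generalizing i with
  | nil => simp [pvFirstIdx] at h
  | cons hd tl ih =>
    obtain ⟨tid, kw⟩ := hd
    simp only [pvFirstIdx] at h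
    split at h
    · simp only [Option.some.injEq] at h
      simp only [List.length_cons]; omega
    · have := ih (i + 1) h; simp only [List.length_cons]; omega

-- one product: A's elif-chain update = write into the slot Source B's classify assigns
theorem pvStep_classify (cpu_id gpu_id ram_id mb_id case_id : Option Int)
    (s : Option (List (String × String)) × Option (List (String × String)) × Option (List (String × String)) × Option (List (String × String)) × Option (List (String × String)))
    (p : List (String × String)) :
    pvToList (pvStepA cpu_id gpu_id ram_id mb_id case_id s p) =
      pvSet5 (pvToList s)
        (pvClassify [(cpu_id, "procesador"), (gpu_id, "grafica"), (ram_id, "ram"), (mb_id, "placa"), (case_id, "gabinete")] p) p := by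
  unfold pvStepA pvClassify
  cases (PySem.Dict.mk p).get? "id" with
  | none => rfl
  | some ids =>
    dsimp only
    cases PySem.Int.ofStr? ids with
    | none => rfl
    | some pid =>
      dsimp only
      cases (PySem.Dict.mk p).get? "categoria" with
      | none => rfl
      | some c =>
        dsimp only
        obtain ⟨a, b, d, e, f⟩ := s
        simp only [pvFirstIdx]
        split_ifs <;> rfl

theorem pvMain (cpu_id gpu_id ram_id mb_id case_id : Option Int)
    (productos : List (List (String × String))) :
    pvToList (productos.foldl (pvStepA cpu_id gpu_id ram_id mb_id case_id) (none, none, none, none, none)) =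
      (List.range 5).map (fun slot =>
        (((productos.map (fun p => (pvClassify [(cpu_id, "procesador"), (gpu_id, "grafica"), (ram_id, "ram"), (mb_id, "placa"), (case_id, "gabinete")] p, p))).reverse.find? (fun t => t.1 == some slot)).map Prod.snd)) := by
  induction productos using List.reverseRecOn with
  | nil => rfl
  | append_singleton prods p ih =>
    rw [List.foldl_append, List.foldl_cons, List.foldl_nil, pvStep_classify, ih,
        List.map_append, List.reverse_append]
    simp only [List.map_cons, List.map_nil, List.reverse_cons, List.reverse_nil,
      List.nil_append, List.cons_append, List.find?]
    cases hc : pvClassify [(cpu_id, "procesador"), (gpu_id, "grafica"), (ram_id, "ram"), (mb_id, "placa"), (case_id, "gabinete")] p with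
    | none =>
      simp only [pvSet5]
      simp [List.range_succ]
    | some j =>
      have hj : j < 5 := by
        unfold pvClassify at hc
        split at hc
        · simp at hc
        split at hc
        · simp at hc
        split at hc
        · simp at hc
        have := pvFirstIdx_lt _ 0 _ _ j hc
        simpa using this
      simp only [pvSet5]
      interval_cases j <;> simp [List.range_succ]

-- ===== VERDICT (by name: the statement is the Claim_ definition above) =====
theorem seleccionar_por_id_spec : Claim_equal_seleccionar_por_id := by
  intro productos cpu_id gpu_id ram_id mb_id case_id _
  unfold Spec_seleccionar_por_id
  have halt : seleccionar_por_id_alt productos cpu_id gpu_id ram_id mb_id case_id =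
      (List.range 5).map (fun slot =>
        (((productos.map (fun p => (pvClassify [(cpu_id, "procesador"), (gpu_id, "grafica"), (ram_id, "ram"), (mb_id, "placa"), (case_id, "gabinete")] p, p))).reverse.find? (fun t => t.1 == some slot)).map Prod.snd)) := rfl
  rw [halt, ← pvMain cpu_id gpu_id ram_id mb_id case_id productos]
  unfold seleccionar_por_id pvToList
  rfl
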